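-- pv_equiv track=rewrite | github.com/arrueegg/ZoneTwo | backend/routers/preparation.py | _training_days
-- ===== SOURCE A (Python) =====
-- def _training_days(days_per_week: int, long_run_day: str) -> list[str]:
--     templates = {
--         3: ["Tue", "Thu"],
--         4: ["Tue", "Thu", "Sat"],
--         5: ["Mon", "Tue", "Thu", "Sat"],
--         6: ["Mon", "Tue", "Wed", "Thu", "Sat"],
--         7: ["Mon", "Tue", "Wed", "Thu", "Fri", "Sat"],
--     }
--     days = [day for day in templates.get(days_per_week, templates[4]) if day != long_run_day]
--     days.append(long_run_day)
--     return sorted(days, key=_day_order)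
--
-- def _day_order(day: str) -> int:
--     return {"Mon": 0, "Tue": 1, "Wed": 2, "Thu": 3, "Fri": 4, "Sat": 5, "Sun": 6}.get(day, 6)
-- ===== SOURCE B (Python) =====
-- _WEEK = ["Mon", "Tue", "Wed", "Thu", "Fri", "Sat", "Sun"]
-- _TEMPLATES = {
--     3: ["Tue", "Thu"],
--     4: ["Tue", "Thu", "Sat"],
--     5: ["Mon", "Tue", "Thu", "Sat"],
--     6: ["Mon", "Tue", "Wed", "Thu", "Sat"],
--     7: ["Mon", "Tue", "Wed", "Thu", "Fri", "Sat"],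
-- }
--
-- def _training_days(days_per_week: int, long_run_day: str) -> list[str]:
--     target = set(_TEMPLATES.get(days_per_week, _TEMPLATES[4]))
--     target.add(long_run_day)
--     result = [d for d in _WEEK if d in target]
--     if long_run_day not in _WEEK:
--         result.append(long_run_day)
--     return result
-- ===== Notes on version B (the rewrite author's own statement) =====
-- stated objective: idiomatic
-- what changed: B builds a target set (template days plus the long-run day) and collects matches by one scan over the fixed Mon..Sun week order, appending an unknown long_run_day at the end, instead of A's filter + append + sort with a _day_order key function.
import Mathlib
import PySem

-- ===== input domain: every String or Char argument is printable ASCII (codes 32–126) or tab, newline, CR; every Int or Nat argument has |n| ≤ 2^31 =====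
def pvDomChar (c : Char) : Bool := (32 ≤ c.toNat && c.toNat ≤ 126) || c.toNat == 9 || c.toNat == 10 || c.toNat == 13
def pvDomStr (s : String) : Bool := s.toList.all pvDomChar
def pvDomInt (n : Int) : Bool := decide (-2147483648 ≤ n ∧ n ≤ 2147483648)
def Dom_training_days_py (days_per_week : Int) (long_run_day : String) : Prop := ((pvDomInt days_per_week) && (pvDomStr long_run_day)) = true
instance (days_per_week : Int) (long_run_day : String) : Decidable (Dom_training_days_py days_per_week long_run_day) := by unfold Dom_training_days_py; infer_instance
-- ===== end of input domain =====

-- B replaces A's filter + append + sort(key=_day_order) by a single scan over the fixed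
-- week-order list collecting a target set (no sort, no _day_order helper); an unknown
-- long_run_day is appended at the end, exactly where A's default sort key places it.

-- ===== PORT A =====
def day_order_py (day : String) : Int :=
  (PySem.Dict.mk [("Mon", (0:Int)), ("Tue", 1), ("Wed", 2), ("Thu", 3), ("Fri", 4), ("Sat", 5), ("Sun", 6)]).getD day 6

def training_days_py (days_per_week : Int) (long_run_day : String) : List String :=
  let templates : PySem.Dict Int (List String) := PySem.Dict.mk
    [(3, ["Tue", "Thu"]),
     (4, ["Tue", "Thu", "Sat"]),
     (5, ["Mon", "Tue", "Thu", "Sat"]),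
     (6, ["Mon", "Tue", "Wed", "Thu", "Sat"]),
     (7, ["Mon", "Tue", "Wed", "Thu", "Fri", "Sat"])]
  -- templates[4] always exists, so the .getD [] branch of the literal lookup is dead
  let days := (templates.getD days_per_week ((templates.get? 4).getD [])).filter
    (fun day => decide (day ≠ long_run_day))
  let days := days ++ [long_run_day]
  PySem.List.sorted days day_order_py false

-- ===== PORT B =====
def pvWeek : List String := ["Mon", "Tue", "Wed", "Thu", "Fri", "Sat", "Sun"]

def pvTemplates : PySem.Dict Int (List String) := PySem.Dict.mk
  [(3, ["Tue", "Thu"]),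
   (4, ["Tue", "Thu", "Sat"]),
   (5, ["Mon", "Tue", "Thu", "Sat"]),
   (6, ["Mon", "Tue", "Wed", "Thu", "Sat"]),
   (7, ["Mon", "Tue", "Wed", "Thu", "Fri", "Sat"])]

def training_days_py_alt (days_per_week : Int) (long_run_day : String) : List String :=
  let target : PySem.Set String :=
    PySem.Set.add (PySem.Set.ofList (pvTemplates.getD days_per_week ((pvTemplates.get? 4).getD []))) long_run_day
  let result := pvWeek.filter (fun d => PySem.Set.contains target d)
  if long_run_day ∈ pvWeek then result else result ++ [long_run_day]

-- ===== PRECONDITION & SPEC =====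
def Spec_training_days_py (days_per_week : Int) (long_run_day : String) (out : List String) : Prop := out = training_days_py_alt days_per_week long_run_day
instance (days_per_week : Int) (long_run_day : String) (out : List String) : Decidable (Spec_training_days_py days_per_week long_run_day out) := by unfold Spec_training_days_py; infer_instance

-- ===== CLAIM (what is proved, stated in full; the proofs are below) =====
def Claim_equal_training_days_py : Prop := ∀ (days_per_week : Int) (long_run_day : String), Dom_training_days_py days_per_week long_run_day → Spec_training_days_py days_per_week long_run_day (training_days_py days_per_week long_run_day)

-- ===== LEMMAS AND PROOFS =====

-- the case of a long_run_day that is none of the seven week-day names, for each template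
theorem pv_sym_case (t : List String) (lrd : String)
    (ht : t = ["Tue","Thu"] ∨ t = ["Tue","Thu","Sat"] ∨ t = ["Mon","Tue","Thu","Sat"] ∨
          t = ["Mon","Tue","Wed","Thu","Sat"] ∨ t = ["Mon","Tue","Wed","Thu","Fri","Sat"])
    (h : lrd ∉ pvWeek) :
    PySem.List.sorted ((t.filter (fun d => decide (d ≠ lrd))) ++ [lrd]) day_order_py false
      = (pvWeek.filter (fun d => PySem.Set.contains (PySem.Set.add (PySem.Set.ofList t) lrd) d)) ++ [lrd] := by
  simp [pvWeek] at h
  obtain ⟨h1, h2, h3, h4, h5, h6, h7⟩ := h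
  have g1 : ¬ (("Mon":String) = lrd) := fun e => h1 e.symm
  have g2 : ¬ (("Tue":String) = lrd) := fun e => h2 e.symm
  have g3 : ¬ (("Wed":String) = lrd) := fun e => h3 e.symm
  have g4 : ¬ (("Thu":String) = lrd) := fun e => h4 e.symm
  have g5 : ¬ (("Fri":String) = lrd) := fun e => h5 e.symm
  have g6 : ¬ (("Sat":String) = lrd) := fun e => h6 e.symm
  have g7 : ¬ (("Sun":String) = lrd) := fun e => h7 e.symm
  have hk : day_order_py lrd = 6 := by
    simp [day_order_py, PySem.Dict.getD, PySem.Dict.get?, PySem.Dict.get?_mk_cons,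
      g1, g2, g3, g4, g5, g6, g7]
  rcases ht with ht | ht | ht | ht | ht <;> subst ht
  · have hfil : List.filter (fun d => decide (d ≠ lrd)) ["Tue","Thu"] = ["Tue","Thu"] := by
      simp [List.filter, g1, g2, g3, g4, g5, g6, g7]
    rw [hfil]
    have hset : PySem.Set.add (PySem.Set.ofList ["Tue","Thu"]) lrd = ["Tue","Thu"] ++ [lrd] := by
      rw [PySem.Set.add_of_not_mem]
      · rfl
      · simp [PySem.Set.mem_ofList, h1, h2, h3, h4, h5, h6, h7]
    rw [hset]
    have hB : pvWeek.filter (fun d => PySem.Set.contains (["Tue","Thu"] ++ [lrd]) d) = ["Tue","Thu"] := by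
      simp [pvWeek, List.filter, PySem.Set.contains, g1, g2, g3, g4, g5, g6, g7]
    rw [hB]
    refine PySem.List.sorted_eq_of_perm_of_pairwise_lt _ ((_ : List String) ++ [lrd]) day_order_py ?_ ?_
    · exact List.Perm.refl _
    · simp [List.pairwise_append, List.pairwise_cons, hk]
      decide
  · have hfil : List.filter (fun d => decide (d ≠ lrd)) ["Tue","Thu","Sat"] = ["Tue","Thu","Sat"] := by
      simp [List.filter, g1, g2, g3, g4, g5, g6, g7]
    rw [hfil]
    have hset : PySem.Set.add (PySem.Set.ofList ["Tue","Thu","Sat"]) lrd = ["Tue","Thu","Sat"] ++ [lrd] := by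
      rw [PySem.Set.add_of_not_mem]
      · rfl
      · simp [PySem.Set.mem_ofList, h1, h2, h3, h4, h5, h6, h7]
    rw [hset]
    have hB : pvWeek.filter (fun d => PySem.Set.contains (["Tue","Thu","Sat"] ++ [lrd]) d) = ["Tue","Thu","Sat"] := by
      simp [pvWeek, List.filter, PySem.Set.contains, g1, g2, g3, g4, g5, g6, g7]
    rw [hB]
    refine PySem.List.sorted_eq_of_perm_of_pairwise_lt _ ((_ : List String) ++ [lrd]) day_order_py ?_ ?_
    · exact List.Perm.refl _
    · simp [List.pairwise_append, List.pairwise_cons, hk]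
      decide
  · have hfil : List.filter (fun d => decide (d ≠ lrd)) ["Mon","Tue","Thu","Sat"] = ["Mon","Tue","Thu","Sat"] := by
      simp [List.filter, g1, g2, g3, g4, g5, g6, g7]
    rw [hfil]
    have hset : PySem.Set.add (PySem.Set.ofList ["Mon","Tue","Thu","Sat"]) lrd = ["Mon","Tue","Thu","Sat"] ++ [lrd] := by
      rw [PySem.Set.add_of_not_mem]
      · rfl
      · simp [PySem.Set.mem_ofList, h1, h2, h3, h4, h5, h6, h7]
    rw [hset]
    have hB : pvWeek.filter (fun d => PySem.Set.contains (["Mon","Tue","Thu","Sat"] ++ [lrd]) d) = ["Mon","Tue","Thu","Sat"] := by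
      simp [pvWeek, List.filter, PySem.Set.contains, g1, g2, g3, g4, g5, g6, g7]
    rw [hB]
    refine PySem.List.sorted_eq_of_perm_of_pairwise_lt _ ((_ : List String) ++ [lrd]) day_order_py ?_ ?_
    · exact List.Perm.refl _
    · simp [List.pairwise_append, List.pairwise_cons, hk]
      decide
  · have hfil : List.filter (fun d => decide (d ≠ lrd)) ["Mon","Tue","Wed","Thu","Sat"] = ["Mon","Tue","Wed","Thu","Sat"] := by
      simp [List.filter, g1, g2, g3, g4, g5, g6, g7]
    rw [hfil]
    have hset : PySem.Set.add (PySem.Set.ofList ["Mon","Tue","Wed","Thu","Sat"]) lrd = ["Mon","Tue","Wed","Thu","Sat"] ++ [lrd] := by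
      rw [PySem.Set.add_of_not_mem]
      · rfl
      · simp [PySem.Set.mem_ofList, h1, h2, h3, h4, h5, h6, h7]
    rw [hset]
    have hB : pvWeek.filter (fun d => PySem.Set.contains (["Mon","Tue","Wed","Thu","Sat"] ++ [lrd]) d) = ["Mon","Tue","Wed","Thu","Sat"] := by
      simp [pvWeek, List.filter, PySem.Set.contains, g1, g2, g3, g4, g5, g6, g7]
    rw [hB]
    refine PySem.List.sorted_eq_of_perm_of_pairwise_lt _ ((_ : List String) ++ [lrd]) day_order_py ?_ ?_
    · exact List.Perm.refl _
    · simp [List.pairwise_append, List.pairwise_cons, hk]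
      decide
  · have hfil : List.filter (fun d => decide (d ≠ lrd)) ["Mon","Tue","Wed","Thu","Fri","Sat"] = ["Mon","Tue","Wed","Thu","Fri","Sat"] := by
      simp [List.filter, g1, g2, g3, g4, g5, g6, g7]
    rw [hfil]
    have hset : PySem.Set.add (PySem.Set.ofList ["Mon","Tue","Wed","Thu","Fri","Sat"]) lrd = ["Mon","Tue","Wed","Thu","Fri","Sat"] ++ [lrd] := by
      rw [PySem.Set.add_of_not_mem]
      · rfl
      · simp [PySem.Set.mem_ofList, h1, h2, h3, h4, h5, h6, h7]
    rw [hset]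
    have hB : pvWeek.filter (fun d => PySem.Set.contains (["Mon","Tue","Wed","Thu","Fri","Sat"] ++ [lrd]) d) = ["Mon","Tue","Wed","Thu","Fri","Sat"] := by
      simp [pvWeek, List.filter, PySem.Set.contains, g1, g2, g3, g4, g5, g6, g7]
    rw [hB]
    refine PySem.List.sorted_eq_of_perm_of_pairwise_lt _ ((_ : List String) ++ [lrd]) day_order_py ?_ ?_
    · exact List.Perm.refl _
    · simp [List.pairwise_append, List.pairwise_cons, hk]
      decide

-- ===== VERDICT (by name: the statement is the Claim_ definition above) =====
theorem training_days_py_spec : Claim_equal_training_days_py := by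
  intro dpw lrd _
  unfold Spec_training_days_py
  simp only [training_days_py, training_days_py_alt, pvTemplates]
  by_cases c3 : dpw = 3
  · subst c3
    by_cases hw : lrd ∈ pvWeek
    · simp only [pvWeek] at hw; fin_cases hw <;> decide
    · rw [if_neg hw]
      exact pv_sym_case _ lrd (by decide) hw
  by_cases c4 : dpw = 4
  · subst c4
    by_cases hw : lrd ∈ pvWeek
    · simp only [pvWeek] at hw; fin_cases hw <;> decide
    · rw [if_neg hw]
      exact pv_sym_case _ lrd (by decide) hw
  by_cases c5 : dpw = 5
  · subst c5
    by_cases hw : lrd ∈ pvWeek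
    · simp only [pvWeek] at hw; fin_cases hw <;> decide
    · rw [if_neg hw]
      exact pv_sym_case _ lrd (by decide) hw
  by_cases c6 : dpw = 6
  · subst c6
    by_cases hw : lrd ∈ pvWeek
    · simp only [pvWeek] at hw; fin_cases hw <;> decide
    · rw [if_neg hw]
      exact pv_sym_case _ lrd (by decide) hw
  by_cases c7 : dpw = 7
  · subst c7
    by_cases hw : lrd ∈ pvWeek
    · simp only [pvWeek] at hw; fin_cases hw <;> decide
    · rw [if_neg hw]
      exact pv_sym_case _ lrd (by decide) hw
  · have n3 : ¬ ((3:Int) = dpw) := fun e => c3 e.symm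
    have n4 : ¬ ((4:Int) = dpw) := fun e => c4 e.symm
    have n5 : ¬ ((5:Int) = dpw) := fun e => c5 e.symm
    have n6 : ¬ ((6:Int) = dpw) := fun e => c6 e.symm
    have n7 : ¬ ((7:Int) = dpw) := fun e => c7 e.symm
    have ht : (PySem.Dict.mk
        [((3:Int), ["Tue", "Thu"]),
         (4, ["Tue", "Thu", "Sat"]),
         (5, ["Mon", "Tue", "Thu", "Sat"]),
         (6, ["Mon", "Tue", "Wed", "Thu", "Sat"]),
         (7, ["Mon", "Tue", "Wed", "Thu", "Fri", "Sat"])]).getD dpw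
        (((PySem.Dict.mk
        [((3:Int), ["Tue", "Thu"]),
         (4, ["Tue", "Thu", "Sat"]),
         (5, ["Mon", "Tue", "Thu", "Sat"]),
         (6, ["Mon", "Tue", "Wed", "Thu", "Sat"]),
         (7, ["Mon", "Tue", "Wed", "Thu", "Fri", "Sat"])]).get? 4).getD [])
        = ["Tue", "Thu", "Sat"] := by
      simp [PySem.Dict.getD, PySem.Dict.get?, PySem.Dict.get?_mk_cons, beq_iff_eq,
        n3, n4, n5, n6, n7]
    rw [ht]
    by_cases hw : lrd ∈ pvWeek
    · simp only [pvWeek] at hw; fin_cases hw <;> decide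
    · rw [if_neg hw]
      exact pv_sym_case _ lrd (by decide) hw
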